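-- pv_equiv track=rewrite | github.com/wkazmierczak/Introduction_to_Computer_Science_AGH_UST_course | kolokwia/21_1a_zad_2.py | najdluzszy_podciag
-- ===== SOURCE A (Python) =====
-- def konwerter_na_sys_o_podst_4(num):
--     t_1 = [False for _ in range(4)]
--     #suma = 0
--     #i = 0
--     while num > 0:
--         digit = num % 4
--         num //= 4
--         t_1[digit] = True
--         #suma = digit*(10**i) + suma
--         #i += 1
--     #return suma
--     return t_1
--
-- def najdluzszy_podciag(tab):
--     poczatek = 0
--     koniec = 0
--     longest = 0
--     while poczatek < len(tab):
--         counter = 0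
--         koniec = poczatek
--         while koniec < len(tab):
--             if konwerter_na_sys_o_podst_4(tab[poczatek]) == konwerter_na_sys_o_podst_4(tab[koniec]):
--                 counter += 1
--             koniec += 1
--         if counter > longest:
--             longest = counter
--         poczatek += 1
--     return longest
-- ===== SOURCE B (Python) =====
-- def konwerter_na_sys_o_podst_4(num):
--     t_1 = [False for _ in range(4)]
--     while num > 0:
--         digit = num % 4
--         num //= 4
--         t_1[digit] = True
--     return t_1
--
-- def najdluzszy_podciag(tab):
--     counts = {}
--     for num in tab:
--         sig = tuple(konwerter_na_sys_o_podst_4(num))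
--         counts[sig] = counts.get(sig, 0) + 1
--     longest = 0
--     for c in counts.values():
--         if c > longest:
--             longest = c
--     return longest
-- ===== Notes on version B (the rewrite author's own statement) =====
-- stated objective: faster
-- what changed: Replaced the quadratic nested rescanning (for each start index, re-count matching signatures over the suffix) with a single pass that tallies each element's base-4 digit-presence signature in a dict and returns the maximum tally.
import Mathlib
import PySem

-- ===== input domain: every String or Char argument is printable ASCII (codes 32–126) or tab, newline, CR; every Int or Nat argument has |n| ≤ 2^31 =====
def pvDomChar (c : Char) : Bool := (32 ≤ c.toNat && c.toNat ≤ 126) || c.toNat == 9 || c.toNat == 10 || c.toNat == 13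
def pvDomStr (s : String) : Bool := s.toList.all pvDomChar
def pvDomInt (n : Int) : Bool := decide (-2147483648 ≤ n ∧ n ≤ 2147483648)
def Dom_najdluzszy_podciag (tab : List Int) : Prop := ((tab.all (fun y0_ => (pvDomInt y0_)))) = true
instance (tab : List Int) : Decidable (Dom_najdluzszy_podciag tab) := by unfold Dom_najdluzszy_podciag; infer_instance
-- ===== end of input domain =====

-- B replaces A's quadratic nested rescanning with one dict-counting pass over the
-- signatures plus a max over the tallies (faster; equivalence proved for all inputs).

-- ===== PORT A =====
-- helper konwerter_na_sys_o_podst_4: the while loop, state (num, t_1)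
def konvAux (num : Int) (t : List Bool) : List Bool :=
  if h : num > 0 then
    konvAux (PySem.Int.floordiv num 4) (t.set (PySem.Int.mod num 4).toNat true)
  else t
termination_by num.toNat
decreasing_by
  have h1 : PySem.Int.floordiv num 4 = num / 4 := PySem.Int.floordiv_eq_ediv_of_pos (by omega)
  rw [h1]; omega

def konwerter_na_sys_o_podst_4 (num : Int) : List Bool :=
  konvAux num (List.replicate 4 false)

-- inner while loop of A: koniec scans from its start to len(tab)
def innerA (tab : List Int) (p koniec : Nat) (counter : Int) : Int :=
  if koniec < tab.length then
    innerA tab p (koniec + 1)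
      (if konwerter_na_sys_o_podst_4 (tab.getD p 0) = konwerter_na_sys_o_podst_4 (tab.getD koniec 0)
       then counter + 1 else counter)
  else counter
termination_by tab.length - koniec

-- outer while loop of A
def outerA (tab : List Int) (poczatek : Nat) (longest : Int) : Int :=
  if poczatek < tab.length then
    let counter := innerA tab poczatek poczatek 0
    outerA tab (poczatek + 1) (if counter > longest then counter else longest)
  else longest
termination_by tab.length - poczatek

def najdluzszy_podciag (tab : List Int) : Int :=
  outerA tab 0 0

-- ===== PORT B =====
def najdluzszy_podciag_alt (tab : List Int) : Int :=
  let counts := tab.foldl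
    (fun d num =>
      let sig := konwerter_na_sys_o_podst_4 num
      d.insert sig (d.getD sig 0 + 1))
    PySem.Dict.empty
  counts.values.foldl (fun longest c => if c > longest then c else longest) 0

-- ===== PRECONDITION & SPEC =====
def Spec_najdluzszy_podciag (tab : List Int) (out : Int) : Prop := out = najdluzszy_podciag_alt tab
instance (tab : List Int) (out : Int) : Decidable (Spec_najdluzszy_podciag tab out) := by unfold Spec_najdluzszy_podciag; infer_instance

-- ===== CLAIM (what is proved, stated in full; the proofs are below) =====
def Claim_equal_najdluzszy_podciag : Prop := ∀ (tab : List Int), Dom_najdluzszy_podciag tab → Spec_najdluzszy_podciag tab (najdluzszy_podciag tab)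

-- ===== LEMMAS AND PROOFS =====

-- fold-max helpers over Int
theorem fm_init_le (l : List Int) (a : Int) : a ≤ l.foldl max a := by
  induction l generalizing a with
  | nil => simp
  | cons x xs ih => exact le_trans (le_max_left a x) (ih _)

theorem fm_mem_le (l : List Int) (a x : Int) (hx : x ∈ l) : x ≤ l.foldl max a := by
  induction l generalizing a with
  | nil => cases hx
  | cons y ys ih =>
    rcases List.mem_cons.mp hx with rfl | h
    · exact le_trans (le_max_right a x) (fm_init_le ys _)
    · exact ih _ h

theorem fm_cases (l : List Int) (a : Int) : l.foldl max a = a ∨ l.foldl max a ∈ l := by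
  induction l generalizing a with
  | nil => left; rfl
  | cons y ys ih =>
    rcases ih (max a y) with h | h
    · by_cases hy : y ≤ a
      · left; rw [List.foldl_cons, max_eq_left hy]; rw [max_eq_left hy] at h; exact h
      · right; rw [List.foldl_cons, h, max_eq_right (by omega : a ≤ y)]
        exact List.mem_cons_self ..
    · right; exact List.mem_cons_of_mem _ h

-- A's step function is max
theorem step_eq_max : (fun (longest c : Int) => if c > longest then c else longest) = max := by
  funext a b; by_cases h : b > a
  · simp [h, max_eq_right h.le]
  · simp [h, max_eq_left (by omega : b ≤ a)]

-- characterisation of the inner loop: it adds the count of p's signature over the suffix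
theorem innerA_spec (tab : List Int) (p : Nat) : ∀ (koniec : Nat) (c : Int),
    innerA tab p koniec c =
      c + (((tab.drop koniec).map konwerter_na_sys_o_podst_4).count
            (konwerter_na_sys_o_podst_4 (tab.getD p 0)) : Int) := by
  suffices hh : ∀ (n koniec : Nat) (c : Int), tab.length - koniec = n →
      innerA tab p koniec c =
        c + (((tab.drop koniec).map konwerter_na_sys_o_podst_4).count
              (konwerter_na_sys_o_podst_4 (tab.getD p 0)) : Int) by
    intro koniec c; exact hh _ koniec c rfl
  intro n
  induction n with
  | zero =>
    intro koniec c hn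
    have h : ¬ koniec < tab.length := by omega
    rw [innerA]
    simp [h, List.drop_of_length_le (by omega : tab.length ≤ koniec)]
  | succ n ih =>
    intro koniec c hn
    have h : koniec < tab.length := by omega
    rw [innerA]; simp only [h, if_true]
    rw [ih (koniec + 1) _ (by omega)]
    have hdrop : tab.drop koniec = tab[koniec] :: tab.drop (koniec + 1) :=
      List.drop_eq_getElem_cons h
    have hgetD : tab.getD koniec 0 = tab[koniec] := List.getD_eq_getElem tab 0 h
    by_cases he : konwerter_na_sys_o_podst_4 (tab.getD p 0)
        = konwerter_na_sys_o_podst_4 (tab.getD koniec 0)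
    · have hhead : konwerter_na_sys_o_podst_4 tab[koniec]
          = konwerter_na_sys_o_podst_4 (tab.getD p 0) := by
        rw [hgetD] at he; exact he.symm
      rw [if_pos he, hdrop, List.map_cons, hhead, List.count_cons_self]
      push_cast; ring
    · have hne : konwerter_na_sys_o_podst_4 (tab.getD p 0)
          ≠ konwerter_na_sys_o_podst_4 tab[koniec] := by
        rw [hgetD] at he; exact he
      rw [if_neg he, hdrop, List.map_cons, List.count_cons_of_ne hne.symm]

-- the list of values A's outer loop maximises
def valsA (tab : List Int) : List Int :=
  (List.range tab.length).map (fun i =>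
    (((tab.drop i).map konwerter_na_sys_o_podst_4).count
      (konwerter_na_sys_o_podst_4 (tab.getD i 0)) : Int))

theorem outerA_spec (tab : List Int) : ∀ (p : Nat) (L : Int), outerA tab p L =
    ((List.range' p (tab.length - p)).map (fun i =>
      (((tab.drop i).map konwerter_na_sys_o_podst_4).count
        (konwerter_na_sys_o_podst_4 (tab.getD i 0)) : Int))).foldl max L := by
  suffices hh : ∀ (n p : Nat) (L : Int), tab.length - p = n → outerA tab p L =
      ((List.range' p (tab.length - p)).map (fun i =>
        (((tab.drop i).map konwerter_na_sys_o_podst_4).count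
          (konwerter_na_sys_o_podst_4 (tab.getD i 0)) : Int))).foldl max L by
    intro p L; exact hh _ p L rfl
  intro n
  induction n with
  | zero =>
    intro p L hn
    have h : ¬ p < tab.length := by omega
    rw [outerA]; simp [h, hn]
  | succ n ih =>
    intro p L hn
    have h : p < tab.length := by omega
    rw [outerA]; simp only [h, if_true]
    rw [ih (p + 1) _ (by omega), hn, show tab.length - (p + 1) = n from by omega,
        List.range'_succ, List.map_cons, List.foldl_cons]
    congr 1
    rw [innerA_spec tab p p 0]
    by_cases hc : (0 : Int) + (((tab.drop p).map konwerter_na_sys_o_podst_4).count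
        (konwerter_na_sys_o_podst_4 (tab.getD p 0)) : Int) > L
    · rw [if_pos hc, max_eq_right (by omega)]; omega
    · rw [if_neg hc, max_eq_left (by omega)]

theorem A_eq_fold (tab : List Int) : najdluzszy_podciag tab = (valsA tab).foldl max 0 := by
  rw [najdluzszy_podciag, outerA_spec tab 0 0, valsA]
  simp [List.range_eq_range']

-- B's values list
def valsB (tab : List Int) : List Int :=
  (PySem.List.dedup (tab.map konwerter_na_sys_o_podst_4)).map
    (fun s => ((tab.map konwerter_na_sys_o_podst_4).count s : Int))

theorem B_eq_fold (tab : List Int) : najdluzszy_podciag_alt tab = (valsB tab).foldl max 0 := by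
  rw [najdluzszy_podciag_alt]
  have hfold : tab.foldl
      (fun d num =>
        let sig := konwerter_na_sys_o_podst_4 num
        d.insert sig (d.getD sig 0 + 1)) PySem.Dict.empty
      = PySem.Dict.counter (tab.map konwerter_na_sys_o_podst_4) := by
    rw [← PySem.Dict.foldl_insert_getD_add_one_eq_counter, List.foldl_map]
  simp only [hfold, step_eq_max]
  have hv : (PySem.Dict.counter (tab.map konwerter_na_sys_o_podst_4)).values = valsB tab := by
    show ((PySem.Dict.counter (tab.map konwerter_na_sys_o_podst_4)).items).map (·.2) = _
    rw [PySem.Dict.items_counter]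
    simp [valsB, PySem.List.dedup_eq_ofList]
  rw [hv]

-- first-occurrence decomposition
theorem first_occ {α : Type} [DecidableEq α] (s : α) (l : List α) (h : s ∈ l) :
    ∃ l1 l2, l = l1 ++ s :: l2 ∧ s ∉ l1 := by
  induction l with
  | nil => cases h
  | cons x xs ih =>
    by_cases hx : x = s
    · exact ⟨[], xs, by simp [hx], by simp⟩
    · have hs : s ∈ xs := by
        rcases List.mem_cons.mp h with h' | h'
        · exact absurd h'.symm hx
        · exact h'
      rcases ih hs with ⟨l1, l2, heq, hni⟩
      refine ⟨x :: l1, l2, by simp [heq], ?_⟩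
      intro hm
      rcases List.mem_cons.mp hm with h' | h'
      · exact hx h'.symm
      · exact hni h'

-- the core equality of the two maxima
theorem vals_fold_eq (tab : List Int) :
    (valsA tab).foldl max 0 = (valsB tab).foldl max 0 := by
  apply le_antisymm
  · rcases fm_cases (valsA tab) 0 with h | h
    · rw [h]; exact fm_init_le _ _
    · rw [valsA] at h
      obtain ⟨i, hi, hval⟩ := List.mem_map.mp h
      have hilt : i < tab.length := List.mem_range.mp hi
      have hgetD : tab.getD i 0 = tab[i] := List.getD_eq_getElem tab 0 hilt
      have hsmem : konwerter_na_sys_o_podst_4 (tab.getD i 0) ∈ tab.map konwerter_na_sys_o_podst_4 :=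
        List.mem_map.mpr ⟨tab[i], List.getElem_mem hilt, by rw [hgetD]⟩
      have hcle : ((tab.drop i).map konwerter_na_sys_o_podst_4).count
            (konwerter_na_sys_o_podst_4 (tab.getD i 0))
          ≤ (tab.map konwerter_na_sys_o_podst_4).count
            (konwerter_na_sys_o_podst_4 (tab.getD i 0)) := by
        rw [List.map_drop]
        exact (List.drop_sublist i _).count_le _
      have hmemB : (((tab.map konwerter_na_sys_o_podst_4).count
          (konwerter_na_sys_o_podst_4 (tab.getD i 0)) : Int)) ∈ valsB tab := by
        rw [valsB]
        exact List.mem_map.mpr ⟨_, (PySem.List.mem_dedup _ _).mpr hsmem, rfl⟩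
      calc (valsA tab).foldl max 0
          = (((tab.drop i).map konwerter_na_sys_o_podst_4).count
              (konwerter_na_sys_o_podst_4 (tab.getD i 0)) : Int) := hval.symm
        _ ≤ (((tab.map konwerter_na_sys_o_podst_4).count
              (konwerter_na_sys_o_podst_4 (tab.getD i 0)) : Int)) := by exact_mod_cast hcle
        _ ≤ (valsB tab).foldl max 0 := fm_mem_le _ _ _ hmemB
  · rcases fm_cases (valsB tab) 0 with h | h
    · rw [h]; exact fm_init_le _ _
    · rw [valsB] at h
      obtain ⟨s, hsd, hval⟩ := List.mem_map.mp h
      have hsmem : s ∈ tab.map konwerter_na_sys_o_podst_4 := (PySem.List.mem_dedup _ _).mp hsd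
      obtain ⟨l1, l2, heq, hni⟩ := first_occ s _ hsmem
      have hilt : l1.length < tab.length := by
        have := congrArg List.length heq
        simp at this; omega
      have hget : konwerter_na_sys_o_podst_4 (tab.getD l1.length 0) = s := by
        have hgetD : tab.getD l1.length 0 = tab[l1.length] := List.getD_eq_getElem tab 0 hilt
        have h1 : (tab.map konwerter_na_sys_o_podst_4)[l1.length]'(by simp [hilt]) = s := by
          simp only [heq]
          rw [List.getElem_append_right (le_refl _)]
          simp
        rw [hgetD, ← List.getElem_map konwerter_na_sys_o_podst_4]
        exact h1
      have hcnt : ((tab.drop l1.length).map konwerter_na_sys_o_podst_4).count s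
          = (tab.map konwerter_na_sys_o_podst_4).count s := by
        rw [List.map_drop]
        have hdrop : (tab.map konwerter_na_sys_o_podst_4).drop l1.length = s :: l2 := by
          rw [heq]; simp
        rw [hdrop, heq, List.count_append, List.count_eq_zero_of_not_mem hni]
        omega
      have hmemA : (((tab.map konwerter_na_sys_o_podst_4).count s : Int)) ∈ valsA tab := by
        rw [valsA]
        refine List.mem_map.mpr ⟨l1.length, List.mem_range.mpr hilt, ?_⟩
        rw [hget, hcnt]
      calc (valsB tab).foldl max 0
          = ((tab.map konwerter_na_sys_o_podst_4).count s : Int) := hval.symm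
        _ ≤ (valsA tab).foldl max 0 := fm_mem_le _ _ _ hmemA

-- ===== VERDICT (by name: the statement is the Claim_ definition above) =====
theorem najdluzszy_podciag_spec : Claim_equal_najdluzszy_podciag := by
  intro tab _
  show najdluzszy_podciag tab = najdluzszy_podciag_alt tab
  rw [A_eq_fold, B_eq_fold, vals_fold_eq]
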